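-- pv_equiv track=rewrite | github.com/Spartiate240/N7 | 2A/S7/Rézo_Telecom/Projet/Projet-telecom_Base.py | routage_adaptatif
-- ===== SOURCE A (Python) =====
-- capacites_adapt = [[0, 10, 0, 100, 100],
--             [10, 0, 10, 100, 100],
--             [0, 10, 0, 100, 100],
--             [100, 100, 100, 0, 1000],
--             [100, 100, 100, 1000, 0]]
--
-- def trouver_chemins(graph, source, destination, chemin_actuel=[]):
--     chemin_actuel = chemin_actuel + [source]  # Ajouter le nœud actuel au chemin
--     if source == destination:  # Si on atteint le nœud de destination, retourner le chemin
--         return [chemin_actuel]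
--
--     chemins = []  # Liste pour stocker les chemins
--     for voisin in graph[source]:
--         if voisin not in chemin_actuel:  # Éviter les boucles
--             chemins += trouver_chemins(graph, voisin, destination, chemin_actuel)
--
--     return chemins
--
-- def routage_adaptatif(liste_adj, appellant, appele):
--     chemins_p = trouver_chemins(liste_adj, appellant, appele)
--
--     meilleur_chemin = []
--     capacite_max = 0
--
--     for chemin in chemins_p:
--         capacite_chemin = min(
--             [capacites_adapt[chemin[i]][chemin[i+1]] for i in range(len(chemin)-1)]
--         )
--
--         if capacite_chemin > capacite_max:
--             capacite_max = capacite_chemin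
--             meilleur_chemin = chemin
--
--     return meilleur_chemin if capacite_max > 0 else []
-- ===== SOURCE B (Python) =====
-- capacites_adapt = [[0, 10, 0, 100, 100],
--             [10, 0, 10, 100, 100],
--             [0, 10, 0, 100, 100],
--             [100, 100, 100, 0, 1000],
--             [100, 100, 100, 1000, 0]]
--
-- def routage_adaptatif(liste_adj, appellant, appele):
--     # Iterative depth-first enumeration with an explicit stack (no recursion),
--     # then a single max()/index() selection pass over the capacities.
--     chemins = []
--     pile = [(appellant, [appellant])]
--     while pile:
--         noeud, chemin = pile.pop()
--         if noeud == appele: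
--             chemins.append(chemin)
--             continue
--         for voisin in reversed(liste_adj[noeud]):
--             if voisin not in chemin:
--                 pile.append((voisin, chemin + [voisin]))
--     if not chemins:
--         return []
--     caps = [min([capacites_adapt[c[i]][c[i+1]] for i in range(len(c) - 1)])
--             for c in chemins]
--     meilleure = max(caps)
--     return chemins[caps.index(meilleure)] if meilleure > 0 else []
-- ===== Notes on version B (the rewrite author's own statement) =====
-- stated objective: alternative
-- what changed: A enumerates all simple paths by recursion (list-concatenating recursive calls) and then folds a strict-improvement scan over them; B replaces the recursion by an iterative depth-first traversal with an explicit stack of (node, path) pairs and replaces the scan by one max()/index() selection over the precomputed capacity list.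
-- outside the precondition, e.g. on routage_adaptatif({0: [1], 1: [2, 9], 9: [0]}, 0, 2): A returns [0, 1, 2], B returns [0, 1, 2]
import Mathlib
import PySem

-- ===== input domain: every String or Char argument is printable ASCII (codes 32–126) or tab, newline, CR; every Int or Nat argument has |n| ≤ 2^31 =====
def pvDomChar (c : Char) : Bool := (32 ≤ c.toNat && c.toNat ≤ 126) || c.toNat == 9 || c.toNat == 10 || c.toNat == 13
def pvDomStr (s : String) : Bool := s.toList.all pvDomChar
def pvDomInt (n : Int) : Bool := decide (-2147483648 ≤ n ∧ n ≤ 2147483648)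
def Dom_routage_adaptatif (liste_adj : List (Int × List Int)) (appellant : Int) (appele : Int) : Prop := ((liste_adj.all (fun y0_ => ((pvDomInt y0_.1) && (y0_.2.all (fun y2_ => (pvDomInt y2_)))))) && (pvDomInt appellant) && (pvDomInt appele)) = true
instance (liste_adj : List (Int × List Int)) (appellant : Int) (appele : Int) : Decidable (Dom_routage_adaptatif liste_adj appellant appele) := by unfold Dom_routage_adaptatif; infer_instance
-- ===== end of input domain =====

-- B replaces A's recursive path enumeration + strict-improvement scan by an
-- iterative explicit-stack depth-first enumeration followed by a single
-- max()/index() selection pass; equality of the RETURN value is proved on Pre_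
-- (the inputs where the Python A returns normally).

-- the module-level constant capacites_adapt (shared by both Python versions)
def capacitesAdapt : List (List Int) :=
  [[0, 10, 0, 100, 100],
   [10, 0, 10, 100, 100],
   [0, 10, 0, 100, 100],
   [100, 100, 100, 0, 1000],
   [100, 100, 100, 1000, 0]]

-- min([capacites_adapt[c[i]][c[i+1]] for i in range(len(c)-1)]) — the same
-- comprehension appears verbatim in Source A and Source B.  The .getD defaults are hit
-- only where Python raises (empty min / out-of-range index), outside Pre_.
def capOfPath (chemin : List Int) : Int :=
  (PySem.List.min?
    ((List.range (chemin.length - 1)).map (fun i =>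
      (PySem.List.pyGet?
        ((PySem.List.pyGet? capacitesAdapt (chemin.getD i 0)).getD [])
        (chemin.getD (i + 1) 0)).getD 0))
    (fun x => x)).getD 0

-- ===== PORT A =====
-- trouver_chemins: enumerate every simple path from source to destination.
-- tcLoop is the 'for voisin in graph[source]' loop (chemins += recursive call).
-- Fuel (liste_adj.length + 1) only makes the recursion structural; it never
-- runs out (a simple path visits each dict key at most once).
mutual
def trouverChemins (graph : PySem.Dict Int (List Int)) (dest : Int) :
    Nat → Int → List Int → List (List Int)
  | fuel, source, chemin_actuel =>
    let chemin := chemin_actuel ++ [source]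
    if source = dest then [chemin]
    else
      match fuel with
      | 0 => []
      | f + 1 => tcLoop graph dest f chemin ((graph.get? source).getD []) []
termination_by fuel _ _ => (fuel, 0, 0)

def tcLoop (graph : PySem.Dict Int (List Int)) (dest : Int) :
    Nat → List Int → List Int → List (List Int) → List (List Int)
  | _, _, [], chemins => chemins
  | f, chemin, voisin :: vs, chemins =>
    tcLoop graph dest f chemin vs
      (if voisin ∈ chemin then chemins
       else chemins ++ trouverChemins graph dest f voisin chemin)
termination_by f _ vs _ => (f, 1, vs.length)
end

def routage_adaptatif (liste_adj : List (Int × List Int)) (appellant : Int) (appele : Int) : List Int :=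
  let chemins_p := trouverChemins (PySem.Dict.mk liste_adj) appele (liste_adj.length + 1) appellant []
  let res := chemins_p.foldl
    (fun st chemin =>
      let capacite_chemin := capOfPath chemin
      if capacite_chemin > st.2 then (chemin, capacite_chemin) else st)
    ([], 0)
  if res.2 > 0 then res.1 else []

-- ===== PORT B =====
-- The 'while pile:' loop of Source B.  Python keeps the stack's top at the END of
-- the list and pushes the neighbours reversed; the port keeps the top at the
-- HEAD, so the (filtered, extended) neighbours are prepended in original
-- order — the same traversal.  The fuel only makes the loop structural: it is
-- proved below (stackLoop_spec) never to run out at the call in the function.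
def stackLoop (graph : PySem.Dict Int (List Int)) (appele : Int) :
    Nat → List (Int × List Int) → List (List Int) → List (List Int)
  | 0, _, chemins => chemins
  | _ + 1, [], chemins => chemins
  | f + 1, (noeud, chemin) :: pile, chemins =>
    if noeud = appele then stackLoop graph appele f pile (chemins ++ [chemin])
    else stackLoop graph appele f
      (((((graph.get? noeud).getD []).filter (fun v => decide (v ∉ chemin))).map
          (fun v => (v, chemin ++ [v]))) ++ pile) chemins

def routage_adaptatif_alt (liste_adj : List (Int × List Int)) (appellant : Int) (appele : Int) : List Int :=
  let graph := PySem.Dict.mk liste_adj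
  let chemins := stackLoop graph appele
    (((liste_adj.flatMap (fun p => p.2)).length + 1) ^ (liste_adj.length + 1))
    [(appellant, [appellant])] []
  if chemins = [] then []
  else
    let caps := chemins.map capOfPath
    let meilleure := (PySem.List.max? caps (fun x => x)).getD 0
    -- chemins[caps.index(meilleure)] — the index is a valid Nat, so List.getD
    if meilleure > 0 then chemins.getD ((PySem.List.index? caps meilleure).getD 0) [] else []

-- ===== PRECONDITION & SPEC =====
-- reachStep/reachFrom: plain graph-reachability closure from `start`, stopping
-- at `appele` (used only to STATE where Python A returns normally).
def reachStep (graph : PySem.Dict Int (List Int)) (appele : Int) (s : List Int) : List Int :=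
  PySem.Set.update s
    (s.flatMap (fun n => if n = appele then [] else (graph.get? n).getD []))

def reachFrom (graph : PySem.Dict Int (List Int)) (appele : Int) (fuel : Nat) (start : Int) : List Int :=
  (List.range fuel).foldl (fun s _ => reachStep graph appele s) [start]

-- backward closure: the nodes from which appele is reachable (via dict keys)
def coReachStep (graph : PySem.Dict Int (List Int)) (c : List Int) : List Int :=
  PySem.Set.update c
    ((graph.items.map (fun p => p.1)).filter
      (fun n => ((graph.get? n).getD []).any (fun v => c.contains v)))

def coReachFrom (graph : PySem.Dict Int (List Int)) (appele : Int) (fuel : Nat) : List Int :=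
  (List.range fuel).foldl (fun c _ => coReachStep graph c) [appele]

-- Pre_ = the inputs on which Python A returns normally — and B raises exactly
-- where A does: appellant ≠ appele (else min([]) raises ValueError), every
-- node reachable from appellant before hitting appele is a dict key or appele
-- itself (else KeyError), and every node on a completed path indexes the fixed
-- 5×5 matrix capacites_adapt, i.e. lies in [-5, 5) (else IndexError).  'Lies
-- on some simple appellant→appele path' has no reasonable closed form, so the
-- last clause over-approximates it by 'reachable and co-reachable'; this also
-- excludes rare inputs whose out-of-range node is on no simple path, where A
-- returns and B returns the same value (cites in claim.json); the equality
-- proof below does not depend on Pre_ at all (the two ports agree everywhere).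
def Pre_routage_adaptatif (liste_adj : List (Int × List Int)) (appellant : Int) (appele : Int) : Prop :=
  let graph := PySem.Dict.mk liste_adj
  appellant ≠ appele ∧
  ∀ n ∈ reachFrom graph appele (liste_adj.length + 2) appellant,
    (n = appele ∨ ∃ q ∈ liste_adj, q.1 = n) ∧
    (n ∈ coReachFrom graph appele (liste_adj.length + 1) → (-5 ≤ n ∧ n < 5))
instance (liste_adj : List (Int × List Int)) (appellant : Int) (appele : Int) : Decidable (Pre_routage_adaptatif liste_adj appellant appele) := by unfold Pre_routage_adaptatif; infer_instance

def pvWitness_routage_adaptatif : (List (Int × List Int)) × Int × Int :=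
  ([(0, [1, 3]), (1, [0, 2]), (2, []), (3, [1])], 0, 1)

def Spec_routage_adaptatif (liste_adj : List (Int × List Int)) (appellant : Int) (appele : Int) (out : List Int) : Prop := out = routage_adaptatif_alt liste_adj appellant appele
instance (liste_adj : List (Int × List Int)) (appellant : Int) (appele : Int) (out : List Int) : Decidable (Spec_routage_adaptatif liste_adj appellant appele out) := by unfold Spec_routage_adaptatif; infer_instance

-- ===== CLAIM (what is proved, stated in full; the proofs are below) =====
def Claim_equal_routage_adaptatif : Prop := ∀ (liste_adj : List (Int × List Int)) (appellant : Int) (appele : Int), Dom_routage_adaptatif liste_adj appellant appele → Pre_routage_adaptatif liste_adj appellant appele → Spec_routage_adaptatif liste_adj appellant appele (routage_adaptatif liste_adj appellant appele)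

-- ===== LEMMAS AND PROOFS =====

-- A's selection loop over the list of enumerated paths
def selA (st : List Int × Int) (paths : List (List Int)) : List Int × Int :=
  paths.foldl
    (fun st chemin =>
      let capacite_chemin := capOfPath chemin
      if capacite_chemin > st.2 then (chemin, capacite_chemin) else st)
    st

-- remaining distinct unvisited keys (+1): the fuel both enumerations need below chemin
def dkeys (kd : List Int) (pref : List Int) : Nat :=
  (kd.filter (fun k => decide (k ∉ pref))).length + 1

-- weight of a stack entry: the number of loop iterations it can still cause
def wEntry (BB : Nat) (kd : List Int) (e : Int × List Int) : Nat :=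
  (BB + 1) ^ (dkeys kd e.2.dropLast)

lemma foldl_max_char (t : List Int) : ∀ x : Int,
    t.foldl max x = match PySem.List.max? t (fun y => y) with
      | none => x
      | some m => max x m := by
  induction t with
  | nil => intro x; simp [PySem.List.max?]
  | cons h t ih =>
    intro x
    rw [List.foldl_cons, ih (max x h), PySem.List.max?_id_cons]
    cases hmt : PySem.List.max? t (fun y => y) with
    | none =>
      cases t with
      | nil => simp
      | cons a s => rw [PySem.List.max?_id_cons] at hmt; cases hmt
    | some m =>
      have : t.foldl max h = max h m := by rw [ih h, hmt]
      simp [this, max_assoc]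

lemma selA_char : ∀ (ps : List (List Int)) (b : List Int) (c : Int),
    selA (b, c) ps =
      match PySem.List.max? (ps.map capOfPath) (fun x => x) with
      | none => (b, c)
      | some m =>
        if c < m then
          (ps.getD ((PySem.List.index? (ps.map capOfPath) m).getD 0) [], m)
        else (b, c) := by
  intro ps
  induction ps with
  | nil => intro b c; simp [selA, PySem.List.max?]
  | cons p ps ih =>
    intro b c
    have hstep : selA (b, c) (p :: ps)
        = selA (if capOfPath p > c then (p, capOfPath p) else (b, c)) ps := rfl
    rw [hstep, List.map_cons, PySem.List.max?_id_cons]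
    cases hmt : PySem.List.max? (ps.map capOfPath) (fun x => x) with
    | none =>
      have hps : ps.map capOfPath = [] := by
        cases hc : ps.map capOfPath with
        | nil => rfl
        | cons a s => rw [hc, PySem.List.max?_id_cons] at hmt; cases hmt
      have hps' : ps = [] := by cases ps <;> simp_all
      subst hps'
      simp only [selA, List.foldl_nil, List.map_nil]
      by_cases h : capOfPath p > c
      · rw [if_pos h]
        rw [if_pos (show c < capOfPath p by omega)]
        simp [PySem.List.index?, List.idxOf?_cons]
      · rw [if_neg h]
        rw [if_neg (show ¬ c < capOfPath p by omega)]
    | some m =>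
      have hfold : (ps.map capOfPath).foldl max (capOfPath p) = max (capOfPath p) m := by
        rw [foldl_max_char, hmt]
      rw [hfold]
      have hmem : m ∈ ps.map capOfPath := PySem.List.max?_mem hmt
      obtain ⟨k, hk⟩ := Option.isSome_iff_exists.mp (List.isSome_idxOf?.mpr hmem)
      have hidx : PySem.List.index? (ps.map capOfPath) m = some k := hk
      by_cases h : capOfPath p > c
      · rw [if_pos h, ih p (capOfPath p), hmt]
        dsimp only
        rw [if_pos (by omega : c < max (capOfPath p) m)]
        by_cases h2 : capOfPath p < m
        · rw [if_pos h2]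
          have hmax : max (capOfPath p) m = m := by omega
          have hne : (capOfPath p == m) = false := by simp; omega
          rw [hmax]
          simp [PySem.List.index?, List.idxOf?_cons, hne] at hidx ⊢
          rw [hidx]
          simp
        · rw [if_neg h2]
          have hmax : max (capOfPath p) m = capOfPath p := by omega
          rw [hmax]
          simp [PySem.List.index?, List.idxOf?_cons]
      · rw [if_neg h, ih b c, hmt]
        dsimp only
        by_cases h2 : c < m
        · rw [if_pos h2, if_pos (by omega : c < max (capOfPath p) m)]
          have hmax : max (capOfPath p) m = m := by omega
          have hne : (capOfPath p == m) = false := by simp; omega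
          rw [hmax]
          simp [PySem.List.index?, List.idxOf?_cons, hne] at hidx ⊢
          rw [hidx]
          simp
        · rw [if_neg h2, if_neg (by omega : ¬ c < max (capOfPath p) m)]


lemma sel_eq (ps : List (List Int)) :
    (if (selA ([], 0) ps).2 > 0 then (selA ([], 0) ps).1 else []) =
      (if ps = [] then []
       else
         if (PySem.List.max? (ps.map capOfPath) (fun x => x)).getD 0 > 0 then
           ps.getD ((PySem.List.index? (ps.map capOfPath)
             ((PySem.List.max? (ps.map capOfPath) (fun x => x)).getD 0)).getD 0) []
         else []) := by
  cases ps with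
  | nil => simp [selA]
  | cons p t =>
    rw [selA_char, List.map_cons, PySem.List.max?_id_cons]
    dsimp only
    by_cases h : 0 < (t.map capOfPath).foldl max (capOfPath p)
    · simp [h]
    · simp [h]

-- the 'for voisin in graph[source]' loop is a flatMap over the unvisited neighbours
lemma tcLoop_flat (graph : PySem.Dict Int (List Int)) (dest : Int) (f : Nat) :
    ∀ (vs : List Int) (chemin : List Int) (acc : List (List Int)),
      tcLoop graph dest f chemin vs acc
        = acc ++ (vs.filter (fun v => decide (v ∉ chemin))).flatMap
            (fun v => trouverChemins graph dest f v chemin) := by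
  intro vs
  induction vs with
  | nil => intro chemin acc; simp [tcLoop]
  | cons v vs ih =>
    intro chemin acc
    rw [tcLoop]
    by_cases hv : v ∈ chemin
    · simp only [hv, if_pos, List.filter_cons]
      rw [ih]; simp [hv]
    · simp only [hv, if_false, List.filter_cons]
      rw [ih]; simp [hv]

lemma dkeys_concat (kd : List Int) (pref : List Int) (n : Int)
    (hkd : kd.Nodup) (hn : n ∈ kd) (hnp : n ∉ pref) :
    dkeys kd pref = dkeys kd (pref ++ [n]) + 1 := by
  unfold dkeys
  have hsplit : kd.filter (fun k => decide (k ∉ pref ++ [n]))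
      = (kd.filter (fun k => decide (k ∉ pref))).filter (fun k => k != n) := by
    rw [List.filter_filter]
    apply List.filter_congr
    intro x _
    by_cases h1 : x ∈ pref <;> by_cases h2 : x = n <;> simp [h1, h2]
  have hmem : n ∈ kd.filter (fun k => decide (k ∉ pref)) := by
    simp [List.mem_filter, hn, hnp]
  have hnd : (kd.filter (fun k => decide (k ∉ pref))).Nodup := hkd.filter _
  have herase : (kd.filter (fun k => decide (k ∉ pref))).filter (fun k => k != n)
      = (kd.filter (fun k => decide (k ∉ pref))).erase n := (hnd.erase_eq_filter n).symm
  have hlen := List.length_erase_of_mem hmem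
  have hpos : 0 < (kd.filter (fun k => decide (k ∉ pref))).length := List.length_pos_of_mem hmem
  rw [hsplit, herase, hlen]
  omega

-- fuel-insensitivity of A's enumeration above the needed depth
lemma tc_fuel (graph : PySem.Dict Int (List Int)) (dest : Int) :
    ∀ (f : Nat) (n : Int) (pref : List Int), n ∉ pref →
      dkeys graph.keys.dedup pref ≤ f →
      trouverChemins graph dest f n pref
        = trouverChemins graph dest (dkeys graph.keys.dedup pref) n pref := by
  intro f
  induction f using Nat.strong_induction_on with
  | _ f ihf =>
    intro n pref hn hf
    by_cases hd : n = dest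
    · rw [trouverChemins.eq_def, trouverChemins.eq_def]; simp [hd]
    · obtain ⟨f', rfl⟩ : ∃ f', f = f' + 1 := ⟨f - 1, by unfold dkeys at hf; omega⟩
      obtain ⟨d, hdk⟩ : ∃ d, dkeys graph.keys.dedup pref = d + 1 := ⟨_, rfl⟩
      rw [hdk, trouverChemins.eq_def, trouverChemins.eq_def]
      simp only [hd, if_false]
      cases hg : graph.get? n with
      | none => simp [hg, tcLoop]
      | some vs =>
        have hkey : n ∈ graph.keys.dedup :=
          List.mem_dedup.mpr (PySem.Dict.mem_keys_of_mem_items _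
            (PySem.Dict.mem_items_of_get?_eq_some _ hg))
        have hstep : dkeys graph.keys.dedup pref = dkeys graph.keys.dedup (pref ++ [n]) + 1 :=
          dkeys_concat _ _ _ (List.nodup_dedup _) hkey hn
        rw [tcLoop_flat, tcLoop_flat]
        congr 1
        unfold List.flatMap
        congr 1
        apply List.map_congr_left
        intro v hv
        have hv2 : v ∉ pref ++ [n] := by
          have := List.of_mem_filter hv
          simpa using this
        have hle : dkeys graph.keys.dedup (pref ++ [n]) ≤ f' := by omega
        rw [ihf f' (by omega) v (pref ++ [n]) hv2 hle]
        congr 1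
        omega

-- the key invariant: the explicit stack performs exactly A's recursion
lemma stackLoop_spec (graph : PySem.Dict Int (List Int)) (appele : Int) (BB : Nat)
    (HB : ∀ (n : Int) (vs : List Int), graph.get? n = some vs → vs.length ≤ BB) :
    ∀ (f : Nat) (pile : List (Int × List Int)) (chemins : List (List Int)),
      (∀ e ∈ pile, e.2 = e.2.dropLast ++ [e.1] ∧ e.1 ∉ e.2.dropLast) →
      (pile.map (wEntry BB graph.keys.dedup)).sum ≤ f →
      stackLoop graph appele f pile chemins
        = chemins ++ pile.flatMap
            (fun e => trouverChemins graph appele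
              (dkeys graph.keys.dedup e.2.dropLast) e.1 e.2.dropLast) := by
  intro f
  induction f with
  | zero =>
    intro pile chemins _ hsum
    have hpile : pile = [] := by
      cases pile with
      | nil => rfl
      | cons e r =>
        exfalso
        have h1 : 1 ≤ wEntry BB graph.keys.dedup e := Nat.one_le_pow _ _ (by omega)
        simp only [List.map_cons, List.sum_cons, Nat.le_zero] at hsum
        omega
    subst hpile
    simp [stackLoop]
  | succ f ihf =>
    intro pile chemins hinv hsum
    cases pile with
    | nil => simp [stackLoop]
    | cons e rest =>
      obtain ⟨n, c⟩ := e
      obtain ⟨hc, hnc⟩ := hinv _ (List.mem_cons_self)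
      simp only at hc hnc
      have hinvr : ∀ e ∈ rest, e.2 = e.2.dropLast ++ [e.1] ∧ e.1 ∉ e.2.dropLast :=
        fun e he => hinv e (List.mem_cons_of_mem _ he)
      have hw1 : 1 ≤ wEntry BB graph.keys.dedup (n, c) := Nat.one_le_pow _ _ (by omega)
      simp only [List.map_cons, List.sum_cons] at hsum
      rw [stackLoop]
      by_cases hd : n = appele
      · rw [if_pos hd]
        rw [ihf rest (chemins ++ [c]) hinvr (by omega)]
        have hsem : trouverChemins graph appele (dkeys graph.keys.dedup c.dropLast) n c.dropLast
            = [c] := by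
          rw [trouverChemins.eq_def]
          simp [hd]
          rw [← hd, ← hc]
        rw [List.flatMap_cons, hsem, List.append_assoc]
      · rw [if_neg hd]
        cases hg : graph.get? n with
        | none =>
          have hsem : trouverChemins graph appele (dkeys graph.keys.dedup c.dropLast) n c.dropLast
              = [] := by
            rw [trouverChemins.eq_def]
            simp only [hd, if_false]
            have h1 : dkeys graph.keys.dedup c.dropLast
                = (dkeys graph.keys.dedup c.dropLast - 1) + 1 := by unfold dkeys; omega
            rw [h1]
            simp [hg, tcLoop]
          simp only [Option.getD_none, List.filter_nil, List.map_nil, List.nil_append]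
          rw [ihf rest chemins hinvr (by omega)]
          rw [List.flatMap_cons, hsem, List.nil_append]
        | some vs =>
          have hkey : n ∈ graph.keys.dedup :=
            List.mem_dedup.mpr (PySem.Dict.mem_keys_of_mem_items _
              (PySem.Dict.mem_items_of_get?_eq_some _ hg))
          have hstep : dkeys graph.keys.dedup c.dropLast
              = dkeys graph.keys.dedup c + 1 := by
            have := dkeys_concat graph.keys.dedup c.dropLast n (List.nodup_dedup _) hkey hnc
            rwa [← hc] at this
          have hsem : trouverChemins graph appele (dkeys graph.keys.dedup c.dropLast) n c.dropLast
              = (vs.filter (fun v => decide (v ∉ c))).flatMap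
                  (fun v => trouverChemins graph appele (dkeys graph.keys.dedup c) v c) := by
            rw [trouverChemins.eq_def]
            simp only [hd, if_false]
            rw [hstep]
            simp only [hg, Option.getD_some]
            rw [tcLoop_flat]
            simp [← hc]
          simp only [Option.getD_some]
          set X := (BB + 1) ^ (dkeys graph.keys.dedup c) with hX
          set pushed := ((vs.filter (fun v => decide (v ∉ c))).map
            (fun v => (v, c ++ [v]))) with hpushed
          have hinvp : ∀ e ∈ pushed ++ rest,
              e.2 = e.2.dropLast ++ [e.1] ∧ e.1 ∉ e.2.dropLast := by
            intro e he
            rcases List.mem_append.mp he with he | he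
            · obtain ⟨v, hv, rfl⟩ := List.mem_map.mp he
              constructor
              · simp [List.dropLast_concat]
              · simp only [List.dropLast_concat]
                simpa using (List.of_mem_filter hv)
            · exact hinvr e he
          have hsump : ((pushed ++ rest).map (wEntry BB graph.keys.dedup)).sum ≤ f := by
            have hlen : (vs.filter (fun v => decide (v ∉ c))).length ≤ BB :=
              le_trans (List.length_filter_le _ _) (HB n vs hg)
            have hwp : (pushed.map (wEntry BB graph.keys.dedup)).sum
                = (vs.filter (fun v => decide (v ∉ c))).length * X := by
              rw [hpushed, List.map_map]
              generalize (vs.filter (fun v => decide (v ∉ c))) = l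
              induction l with
              | nil => simp
              | cons x xs ih =>
                simp only [List.map_cons, List.sum_cons, List.length_cons,
                  Function.comp, ih]
                unfold wEntry
                rw [List.dropLast_concat, ← hX]
                ring
            have hwe : wEntry BB graph.keys.dedup (n, c) = BB * X + X := by
              unfold wEntry
              simp only
              rw [hstep, hX, pow_succ]
              ring
            have hmul : (vs.filter (fun v => decide (v ∉ c))).length * X ≤ BB * X :=
              Nat.mul_le_mul_right _ hlen
            have hX1 : 1 ≤ X := Nat.one_le_pow _ _ (by omega)
            rw [List.map_append, List.sum_append, hwp]
            rw [hwe] at hsum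
            omega
          rw [ihf (pushed ++ rest) chemins hinvp hsump]
          have hpf : pushed.flatMap
              (fun e => trouverChemins graph appele
                (dkeys graph.keys.dedup e.2.dropLast) e.1 e.2.dropLast)
              = (vs.filter (fun v => decide (v ∉ c))).flatMap
                  (fun v => trouverChemins graph appele (dkeys graph.keys.dedup c) v c) := by
            rw [hpushed, List.flatMap_map]
            unfold List.flatMap
            apply congrArg
            apply List.map_congr_left
            intro v _
            simp only [List.dropLast_concat]
          rw [List.flatMap_append, hpf, List.flatMap_cons, hsem]

lemma enum_eq (liste_adj : List (Int × List Int)) (appellant appele : Int) :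
    stackLoop (PySem.Dict.mk liste_adj) appele
        (((liste_adj.flatMap (fun p => p.2)).length + 1) ^ (liste_adj.length + 1))
        [(appellant, [appellant])] []
      = trouverChemins (PySem.Dict.mk liste_adj) appele (liste_adj.length + 1) appellant [] := by
  set graph := PySem.Dict.mk liste_adj with hgraph
  set BB := (liste_adj.flatMap (fun p => p.2)).length with hBB
  have HB : ∀ (n : Int) (vs : List Int), graph.get? n = some vs → vs.length ≤ BB := by
    intro n vs hg
    have hmem : (n, vs) ∈ liste_adj := PySem.Dict.mem_items_of_get?_eq_some _ hg
    rw [hBB, List.length_flatMap]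
    exact List.single_le_sum (by simp) _
      (List.mem_map.mpr ⟨(n, vs), hmem, rfl⟩)
  have hkdlen : dkeys graph.keys.dedup [] ≤ liste_adj.length + 1 := by
    unfold dkeys
    have h1 : (graph.keys.dedup.filter (fun k => decide (k ∉ ([] : List Int)))).length
        = graph.keys.dedup.length := by
      simp
    rw [h1]
    have h2 : graph.keys.dedup.length ≤ graph.keys.length :=
      graph.keys.dedup_sublist.length_le
    have h3 : graph.keys.length = liste_adj.length := by
      rw [hgraph, PySem.Dict.keys_mk, List.length_map]
    omega
  have hsum : ([((appellant : Int), [appellant])].map (wEntry BB graph.keys.dedup)).sum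
      ≤ (BB + 1) ^ (liste_adj.length + 1) := by
    simp only [List.map_cons, List.map_nil, List.sum_cons, List.sum_nil, Nat.add_zero]
    unfold wEntry
    exact Nat.pow_le_pow_right (by omega) (by simpa using hkdlen)
  rw [stackLoop_spec graph appele BB HB _ _ _
      (by intro e he; simp at he; subst he; simp)
      hsum]
  rw [List.flatMap_cons, List.flatMap_nil, List.nil_append, List.append_nil]
  have hdl : (([appellant] : List Int)).dropLast = ([] : List Int) := rfl
  simp only [hdl]
  exact (tc_fuel graph appele (liste_adj.length + 1) appellant []
    (List.not_mem_nil) hkdlen).symm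

-- ===== VERDICT (by name: the statement is the Claim_ definition above) =====
theorem routage_adaptatif_spec : Claim_equal_routage_adaptatif := by
  intro liste_adj appellant appele _ _
  unfold Spec_routage_adaptatif routage_adaptatif routage_adaptatif_alt
  dsimp only
  rw [enum_eq]
  exact sel_eq _
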